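-- pv_equiv track=rewrite | github.com/Bit-of-Meat/Ace-of-Spades-Extracted | Pyglet Engine/pyglet.input.evdev.py | get_set_bits
-- ===== SOURCE A (Python) =====
-- def get_set_bits(bytes):
--     bits = set()
--     j = 0
--     for byte in bytes:
--         for i in range(8):
--             if byte & 1:
--                 bits.add(j + i)
--             byte >>= 1
--
--         j += 8
--
--     return bits
-- ===== SOURCE B (Python) =====
-- def get_set_bits(bytes):
--     bits = set()
--     for j, byte in enumerate(bytes):
--         b = byte % 256
--         while b:
--             low = b & -b
--             bits.add(8 * j + low.bit_length() - 1)
--             b &= b - 1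
--     return bits
-- ===== Notes on version B (the rewrite author's own statement) =====
-- stated objective: alternative
-- what changed: The fixed 8-iteration inner scan with repeated shifting is replaced by a data-dependent clear-lowest-set-bit loop (b & -b / bit_length) over only the set bits of byte % 256, with the base offset taken from enumerate instead of a running counter.
import Mathlib
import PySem

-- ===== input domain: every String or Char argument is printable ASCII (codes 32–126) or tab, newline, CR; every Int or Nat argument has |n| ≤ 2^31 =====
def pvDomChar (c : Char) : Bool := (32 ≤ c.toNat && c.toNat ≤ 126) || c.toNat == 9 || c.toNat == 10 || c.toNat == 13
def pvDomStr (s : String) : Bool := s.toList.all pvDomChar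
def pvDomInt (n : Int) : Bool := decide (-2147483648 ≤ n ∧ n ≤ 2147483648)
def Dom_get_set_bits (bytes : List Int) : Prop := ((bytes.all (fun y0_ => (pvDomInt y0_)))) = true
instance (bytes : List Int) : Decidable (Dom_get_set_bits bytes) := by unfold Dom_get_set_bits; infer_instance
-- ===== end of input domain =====

-- B replaces A's fixed 8-iteration shift-and-test inner scan by a clear-lowest-set-bit loop over the set bits of byte % 256 (alternative formulation, same cost class).

-- ===== PORT A =====
def get_set_bits (bytes : List Int) : List Int :=
  (bytes.foldl (fun (st : List Int × Int) byte =>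
      let inner := (PySem.List.pyRange 0 8 1).foldl
        (fun (st2 : List Int × Int) i =>
          ((if PySem.Int.band st2.2 1 ≠ 0 then PySem.Set.add st2.1 (st.2 + i) else st2.1),
            st2.2 >>> (1 : Nat)))
        (st.1, byte)
      (inner.1, st.2 + 8))
    (PySem.Set.empty, 0)).1

-- ===== PORT B =====
-- the while-loop of Source B; b = byte % 256 is nonnegative in Python, so carrying it as a Nat is exact
def altLoop (base : Int) (bits : List Int) (b : Nat) : List Int :=
  if b = 0 then bits
  else
    altLoop base
      (PySem.Set.add bits
        (base + (PySem.Int.bitLength (PySem.Int.band (b : Int) (-(b : Int))) : Int) - 1))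
      (b &&& (b - 1))
termination_by b
decreasing_by
  have h := Nat.and_le_right (n := b) (m := b - 1)
  omega

def get_set_bits_alt (bytes : List Int) : List Int :=
  (PySem.List.enumerate bytes).foldl
    (fun bits p => altLoop (8 * p.1) bits ((PySem.Int.mod p.2 256).toNat))
    PySem.Set.empty

-- ===== PRECONDITION & SPEC =====
def Spec_get_set_bits (bytes : List Int) (out : List Int) : Prop := out = get_set_bits_alt bytes
instance (bytes : List Int) (out : List Int) : Decidable (Spec_get_set_bits bytes out) := by unfold Spec_get_set_bits; infer_instance

-- ===== CLAIM (what is proved, stated in full; the proofs are below) =====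
def Claim_equal_get_set_bits : Prop := ∀ (bytes : List Int), Dom_get_set_bits bytes → Spec_get_set_bits bytes (get_set_bits bytes)

-- ===== LEMMAS AND PROOFS =====

-- the bit offsets A's inner 8-step scan adds, as a pure list (k steps, first index i, current byte)
def offsA : Nat → Int → Int → List Int
  | 0, _, _ => []
  | k+1, i, byte =>
      (if PySem.Int.band byte 1 ≠ 0 then [i] else []) ++ offsA k (i+1) (byte >>> (1 : Nat))

-- the bit offsets B's while-loop adds, as a pure list (structural fuel so `decide` can evaluate it)
def offsB : Nat → Nat → List Int
  | 0, _ => []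
  | f+1, b =>
      if b = 0 then []
      else ((PySem.Int.bitLength (PySem.Int.band (b : Int) (-(b : Int))) : Int) - 1)
            :: offsB f (b &&& (b - 1))

theorem band_one_emod (x : Int) : PySem.Int.band x 1 = x % 2 := by
  rw [PySem.Int.band_one]
  simp [PySem.Int.mod, Int.fmod_eq_emod]

theorem shiftRight_one_eq (x : Int) : x >>> (1 : Nat) = x / 2 := by
  cases x with
  | ofNat n =>
      show Int.ofNat (n >>> 1) = Int.ofNat n / 2
      rw [Nat.shiftRight_one]
      show ((n / 2 : Nat) : Int) = (n : Int) / 2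
      omega
  | negSucc n =>
      show Int.negSucc (n >>> 1) = Int.negSucc n / 2
      rw [Nat.shiftRight_one, Int.negSucc_eq, Int.negSucc_eq]
      omega

theorem offsA_det (k : Nat) : ∀ (i x y : Int), x % (2 ^ k : Int) = y % (2 ^ k : Int) →
    offsA k i x = offsA k i y := by
  induction k with
  | zero => intro i x y _; rfl
  | succ k ih =>
      intro i x y h
      have hd : ((2 : Int) ^ (k+1)) ∣ (x - y) := by
        exact Int.dvd_of_emod_eq_zero (Int.emod_emod_of_dvd _ dvd_rfl ▸
          (Int.emod_eq_emod_iff_emod_sub_eq_zero.mp h))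
      obtain ⟨t, ht⟩ := hd
      have hx : x = y + (2 ^ k * t) * 2 := by linear_combination ht
      have hcond : PySem.Int.band x 1 = PySem.Int.band y 1 := by
        rw [band_one_emod, band_one_emod, hx]
        simp
      have hshift : x >>> (1 : Nat) = y >>> (1 : Nat) + 2 ^ k * t := by
        rw [shiftRight_one_eq, shiftRight_one_eq, hx,
          Int.add_mul_ediv_right _ _ (by norm_num : (2:Int) ≠ 0)]
      have hrec : (x >>> (1 : Nat)) % (2 ^ k : Int) = (y >>> (1 : Nat)) % (2 ^ k : Int) := by
        rw [hshift]
        simp [Int.add_mul_emod_self_left]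
      simp only [offsA, hcond]
      rw [ih (i+1) _ _ hrec]

set_option maxRecDepth 100000 in
theorem offsA_eq_offsB : ∀ r : Nat, r < 256 → offsA 8 0 (r : Int) = offsB 256 r := by decide

theorem innerA_eq (k : Nat) : ∀ (a j byte : Int) (bits : List Int),
    ((PySem.List.pyRange a (a + (k : Int)) 1).foldl
      (fun (st2 : List Int × Int) i =>
        ((if PySem.Int.band st2.2 1 ≠ 0 then PySem.Set.add st2.1 (j + i) else st2.1),
          st2.2 >>> (1 : Nat)))
      (bits, byte)).1
    = (offsA k a byte).foldl (fun s o => PySem.Set.add s (j + o)) bits := by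
  induction k with
  | zero =>
      intro a j byte bits
      have h0 : PySem.List.pyRange a (a + ((0 : Nat) : Int)) 1 = [] := by
        rw [PySem.List.pyRange_one]; simp
      rw [h0]; rfl
  | succ k ih =>
      intro a j byte bits
      have hlt : a < a + ((k + 1 : Nat) : Int) := by push_cast; omega
      rw [PySem.List.pyRange_one_cons hlt]
      have hb : a + ((k + 1 : Nat) : Int) = (a + 1) + (k : Int) := by push_cast; ring
      rw [List.foldl_cons]
      simp only
      rw [hb]
      by_cases hc : PySem.Int.band byte 1 ≠ 0
      · rw [if_pos hc]
        rw [ih (a+1) j (byte >>> (1:Nat)) (PySem.Set.add bits (j + a))]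
        simp [offsA, hc]
      · rw [if_neg hc]
        rw [ih (a+1) j (byte >>> (1:Nat)) bits]
        simp [offsA, hc]

theorem altLoop_eq (f : Nat) : ∀ (b : Nat), b ≤ f → ∀ (base : Int) (bits : List Int),
    altLoop base bits b = (offsB f b).foldl (fun s o => PySem.Set.add s (base + o)) bits := by
  induction f with
  | zero =>
      intro b hb base bits
      have : b = 0 := by omega
      subst this
      rw [altLoop, offsB]; rfl
  | succ f ih =>
      intro b hb base bits
      by_cases h0 : b = 0
      · subst h0; rw [altLoop, offsB]; rfl
      · rw [altLoop, if_neg h0, offsB, if_neg h0, List.foldl_cons]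
        have hle : b &&& (b - 1) ≤ f := by
          have h := Nat.and_le_right (n := b) (m := b - 1); omega
        rw [ih _ hle]
        have : base + (PySem.Int.bitLength (PySem.Int.band (b : Int) (-(b : Int))) : Int) - 1
             = base + ((PySem.Int.bitLength (PySem.Int.band (b : Int) (-(b : Int))) : Int) - 1) := by ring
        rw [this]

theorem byte_bridge (byte : Int) :
    offsA 8 0 byte = offsB 256 ((PySem.Int.mod byte 256).toNat) := by
  have hm : PySem.Int.mod byte 256 = byte % 256 := by
    simp [PySem.Int.mod, Int.fmod_eq_emod]
  have h0 : (0 : Int) ≤ byte % 256 := Int.emod_nonneg byte (by norm_num)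
  have h1 : byte % 256 < 256 := Int.emod_lt_of_pos byte (by norm_num)
  set r : Nat := (PySem.Int.mod byte 256).toNat with hr
  have hri : (r : Int) = byte % 256 := by rw [hr, hm]; exact Int.toNat_of_nonneg h0
  have hrlt : r < 256 := by omega
  have hdet : offsA 8 0 byte = offsA 8 0 (r : Int) := by
    apply offsA_det 8
    rw [hri]
    show byte % (2^8 : Int) = (byte % 256) % (2^8 : Int)
    norm_num [Int.emod_emod_of_dvd]
  rw [hdet, offsA_eq_offsB r hrlt]

theorem outer_eq (bs : List Int) : ∀ (n : Int) (bits : List Int),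
    (bs.foldl (fun (st : List Int × Int) byte =>
        let inner := (PySem.List.pyRange 0 8 1).foldl
          (fun (st2 : List Int × Int) i =>
            ((if PySem.Int.band st2.2 1 ≠ 0 then PySem.Set.add st2.1 (st.2 + i) else st2.1),
              st2.2 >>> (1 : Nat)))
          (st.1, byte)
        (inner.1, st.2 + 8))
      (bits, 8 * n)).1
    = (PySem.List.enumerate bs n).foldl
        (fun bits p => altLoop (8 * p.1) bits ((PySem.Int.mod p.2 256).toNat)) bits := by
  induction bs with
  | nil => intro n bits; rfl
  | cons b bs ih =>
      intro n bits
      rw [PySem.List.enumerate_cons, List.foldl_cons, List.foldl_cons]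
      have hinner := innerA_eq 8 0 (8 * n) b bits
      have hrange : (0 : Int) + (8 : Nat) = (8 : Int) := by norm_num
      rw [hrange] at hinner
      simp only
      rw [hinner]
      have hB : altLoop (8 * n) bits ((PySem.Int.mod b 256).toNat)
          = (offsB 256 ((PySem.Int.mod b 256).toNat)).foldl
              (fun s o => PySem.Set.add s (8 * n + o)) bits := by
        apply altLoop_eq
        have hm : PySem.Int.mod b 256 = b % 256 := by
          simp [PySem.Int.mod, Int.fmod_eq_emod]
        have h0 : (0 : Int) ≤ b % 256 := Int.emod_nonneg b (by norm_num)
        have h1 : b % 256 < 256 := Int.emod_lt_of_pos b (by norm_num)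
        omega
      rw [hB, ← byte_bridge b]
      have hstep : 8 * n + 8 = 8 * (n + 1) := by ring
      rw [hstep]
      exact ih (n + 1) _

-- ===== VERDICT (by name: the statement is the Claim_ definition above) =====
theorem get_set_bits_spec : Claim_equal_get_set_bits := by
  intro bytes _
  unfold Spec_get_set_bits get_set_bits get_set_bits_alt
  have h := outer_eq bytes 0 PySem.Set.empty
  have h0 : (8 : Int) * 0 = 0 := by norm_num
  rw [h0] at h
  exact h
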